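-- pv_equiv track=rewrite | github.com/joaomariofm/advent-of-code-2023 | day3/1/gear-ratios-if-character-by-character.py | findSymbolAdjacentNumbers
-- ===== SOURCE A (Python) =====
-- def isASymbol(character):
--     if not character.isnumeric() and character != '.':
--         return True
--     return False
--
-- def indexesAreNotOutOfRange(gearsMatrix, i, j):
--     if (0 <= i) and (0 <= j) and (i < len(gearsMatrix)) and (j < len(gearsMatrix[0])):
--         return True
--     return False
--
-- def hasAdjacentSymbol(gearsMatrix, i, j):
--     indexi = 0
--     indexj = 0
--
--     indexi = i-1
--     indexj = j-1
--
--     if indexesAreNotOutOfRange(gearsMatrix, indexi, indexj) and isASymbol(gearsMatrix[indexi][indexj]):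
--         return True
--
--     indexi = i-1
--     indexj = j
--
--     if indexesAreNotOutOfRange(gearsMatrix, indexi, indexj) and isASymbol(gearsMatrix[indexi][indexj]):
--         return True
--
--     indexi = i-1
--     indexj = j+1
--
--     if indexesAreNotOutOfRange(gearsMatrix, indexi, indexj) and isASymbol(gearsMatrix[indexi][indexj]):
--         return True
--
--     indexi = i
--     indexj = j-1
--
--     if indexesAreNotOutOfRange(gearsMatrix, indexi, indexj) and isASymbol(gearsMatrix[indexi][indexj]):
--         return True
--
--     indexi = i
--     indexj = j+1
--
--     if indexesAreNotOutOfRange(gearsMatrix, indexi, indexj) and isASymbol(gearsMatrix[indexi][indexj]):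
--         return True
--
--     indexi = i+1
--     indexj = j-1
--
--     if indexesAreNotOutOfRange(gearsMatrix, indexi, indexj) and isASymbol(gearsMatrix[indexi][indexj]):
--         return True
--
--     indexi = i+1
--     indexj = j
--
--     if indexesAreNotOutOfRange(gearsMatrix, indexi, indexj) and isASymbol(gearsMatrix[indexi][indexj]):
--         return True
--
--     indexi = i+1
--     indexj = j+1
--
--     if indexesAreNotOutOfRange(gearsMatrix, indexi, indexj) and isASymbol(gearsMatrix[indexi][indexj]):
--         return True
--
--     return False
--
-- def findSymbolAdjacentNumbers(gearsMatrix):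
--     numbersAjacentstoSymbols = []
--
--     for i, line in enumerate(gearsMatrix):
--         for j, character in enumerate(line):
--             if character.isnumeric():
--                 if hasAdjacentSymbol(gearsMatrix, i, j):
--                     numbersAjacentstoSymbols.append(character)
--
--     return numbersAjacentstoSymbols
-- ===== SOURCE B (Python) =====
-- def findSymbolAdjacentNumbers(gearsMatrix):
--     adjacent = {(i + di, j + dj)
--                 for i, line in enumerate(gearsMatrix)
--                 for j, ch in enumerate(line)
--                 if not ch.isnumeric() and ch != '.'
--                 for di in (-1, 0, 1)
--                 for dj in (-1, 0, 1)}
--     return [ch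
--             for i, line in enumerate(gearsMatrix)
--             for j, ch in enumerate(line)
--             if ch.isnumeric() and (i, j) in adjacent]
-- ===== Notes on version B (the rewrite author's own statement) =====
-- stated objective: alternative
-- what changed: Replaces per-digit probing of 8 neighbours with explicit bounds checks by one symbol-driven pass that spreads every symbol's 3x3 neighbourhood into a coordinate set, then a comprehension that keeps each digit whose position is in that set.
-- outside the precondition, e.g. on findSymbolAdjacentNumbers(['.', '1x']): A returns [], B returns ['1']
import Mathlib
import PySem

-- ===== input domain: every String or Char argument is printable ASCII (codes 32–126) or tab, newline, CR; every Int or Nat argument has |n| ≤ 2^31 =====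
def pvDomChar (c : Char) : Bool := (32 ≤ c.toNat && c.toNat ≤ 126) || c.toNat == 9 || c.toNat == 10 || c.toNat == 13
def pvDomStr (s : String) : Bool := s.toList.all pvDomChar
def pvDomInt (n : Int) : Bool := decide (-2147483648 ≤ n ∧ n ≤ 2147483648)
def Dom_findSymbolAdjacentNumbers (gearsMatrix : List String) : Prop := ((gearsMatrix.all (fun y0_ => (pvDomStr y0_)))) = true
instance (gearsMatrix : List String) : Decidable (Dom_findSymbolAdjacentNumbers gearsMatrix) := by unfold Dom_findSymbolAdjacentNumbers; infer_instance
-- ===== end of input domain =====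

-- B replaces A's per-digit probing of 8 bound-checked neighbours by one symbol pass that spreads each
-- symbol's 3x3 neighbourhood into a coordinate set, then keeps each digit whose position is in that set
-- (objective: alternative decomposition, same cost).

-- ===== PORT A =====
-- character.isnumeric(): on the printable-ASCII domain Dom_ this is exactly the digits '0'..'9' = PySem.Chars.isdigit
def isASymbol (character : Char) : Bool :=
  if !(PySem.Chars.isdigit character) && character ≠ '.' then true else false

-- len(gearsMatrix[0]): only ever reached with gearsMatrix nonempty (called from the loop body), so getD 0 "" is exact there
def indexesAreNotOutOfRange (gearsMatrix : List String) (i j : Int) : Bool :=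
  if 0 ≤ i ∧ 0 ≤ j ∧ i < (gearsMatrix.length : Int) ∧ j < ((gearsMatrix.getD 0 "").toList.length : Int) then true else false

-- gearsMatrix[indexi][indexj]: every call site guards it with indexesAreNotOutOfRange; under Pre_ (rectangular)
-- both indices are then in range, so the pyGetD defaults are never taken and the access is exact
def cellA (gearsMatrix : List String) (i j : Int) : Char :=
  PySem.List.pyGetD (PySem.List.pyGetD gearsMatrix i "").toList j ' '

def hasAdjacentSymbol (gearsMatrix : List String) (i j : Int) : Bool :=
  if indexesAreNotOutOfRange gearsMatrix (i-1) (j-1) && isASymbol (cellA gearsMatrix (i-1) (j-1)) then true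
  else if indexesAreNotOutOfRange gearsMatrix (i-1) j && isASymbol (cellA gearsMatrix (i-1) j) then true
  else if indexesAreNotOutOfRange gearsMatrix (i-1) (j+1) && isASymbol (cellA gearsMatrix (i-1) (j+1)) then true
  else if indexesAreNotOutOfRange gearsMatrix i (j-1) && isASymbol (cellA gearsMatrix i (j-1)) then true
  else if indexesAreNotOutOfRange gearsMatrix i (j+1) && isASymbol (cellA gearsMatrix i (j+1)) then true
  else if indexesAreNotOutOfRange gearsMatrix (i+1) (j-1) && isASymbol (cellA gearsMatrix (i+1) (j-1)) then true
  else if indexesAreNotOutOfRange gearsMatrix (i+1) j && isASymbol (cellA gearsMatrix (i+1) j) then true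
  else if indexesAreNotOutOfRange gearsMatrix (i+1) (j+1) && isASymbol (cellA gearsMatrix (i+1) (j+1)) then true
  else false

def findSymbolAdjacentNumbers (gearsMatrix : List String) : List String :=
  (PySem.List.enumerate gearsMatrix).foldl (fun acc p =>
    (PySem.List.enumerate p.2.toList).foldl (fun acc2 q =>
      if PySem.Chars.isdigit q.2 then
        if hasAdjacentSymbol gearsMatrix p.1 q.1 then acc2 ++ [String.ofList [q.2]] else acc2
      else acc2) acc) []

-- ===== PORT B =====
def isSymbolChar (ch : Char) : Bool := !(PySem.Chars.isdigit ch) && ch ≠ '.'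

-- the set comprehension of Source B: every 3x3 neighbour (coordinate pair) of every symbol cell
def adjacentCells (gearsMatrix : List String) : PySem.Set (Int × Int) :=
  PySem.Set.ofList ((PySem.List.enumerate gearsMatrix).flatMap (fun p =>
    (PySem.List.enumerate p.2.toList).flatMap (fun q =>
      if isSymbolChar q.2 then
        ([-1, 0, 1] : List Int).flatMap (fun di =>
          ([-1, 0, 1] : List Int).map (fun dj => (p.1 + di, q.1 + dj)))
      else [])))

def findSymbolAdjacentNumbers_alt (gearsMatrix : List String) : List String :=
  let adjacent := adjacentCells gearsMatrix
  (PySem.List.enumerate gearsMatrix).flatMap (fun p =>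
    (PySem.List.enumerate p.2.toList).filterMap (fun q =>
      if PySem.Chars.isdigit q.2 && PySem.Set.contains adjacent (p.1, q.1) then
        some (String.ofList [q.2]) else none))

-- ===== PRECONDITION & SPEC =====
-- Pre_ excludes ragged grids that contain a digit: there A can raise IndexError while probing a row
-- shorter than row 0, and where it still returns, measuring every row by row 0's width is an accident
-- of the implementation (it silently ignores symbols beyond that width, e.g. on ['.', '1x']).
def Pre_findSymbolAdjacentNumbers (gearsMatrix : List String) : Prop :=
  (∀ s ∈ gearsMatrix, s.toList.length = (gearsMatrix.headD "").toList.length) ∨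
  (∀ s ∈ gearsMatrix, ∀ c ∈ s.toList, PySem.Chars.isdigit c = false)
instance (gearsMatrix : List String) : Decidable (Pre_findSymbolAdjacentNumbers gearsMatrix) := by
  unfold Pre_findSymbolAdjacentNumbers; infer_instance

def pvWitness_findSymbolAdjacentNumbers : List String := ["*1", ".2"]

def Spec_findSymbolAdjacentNumbers (gearsMatrix : List String) (out : List String) : Prop := out = findSymbolAdjacentNumbers_alt gearsMatrix
instance (gearsMatrix : List String) (out : List String) : Decidable (Spec_findSymbolAdjacentNumbers gearsMatrix out) := by unfold Spec_findSymbolAdjacentNumbers; infer_instance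

-- ===== CLAIM (what is proved, stated in full; the proofs are below) =====
def Claim_equal_findSymbolAdjacentNumbers : Prop := ∀ (gearsMatrix : List String), Dom_findSymbolAdjacentNumbers gearsMatrix → Pre_findSymbolAdjacentNumbers gearsMatrix → Spec_findSymbolAdjacentNumbers gearsMatrix (findSymbolAdjacentNumbers gearsMatrix)

-- ===== LEMMAS AND PROOFS =====

-- one probe of A: the bounds check plus the symbol test
def chk (g : List String) (a b : Int) : Bool :=
  indexesAreNotOutOfRange g a b && isASymbol (cellA g a b)

-- there is a symbol at integer coordinates (a, b) of the grid
def SymAt (g : List String) (a b : Int) : Prop :=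
  0 ≤ a ∧ a < (g.length : Int) ∧ 0 ≤ b ∧ b < ((g.getD a.toNat "").toList.length : Int) ∧
    isSymbolChar ((g.getD a.toNat "").toList.getD b.toNat ' ') = true

lemma isASymbol_eq (c : Char) : isASymbol c = isSymbolChar c := by
  simp [isASymbol, isSymbolChar]

lemma hasAdj_or (g : List String) (i j : Int) :
    hasAdjacentSymbol g i j =
      (chk g (i-1) (j-1) || chk g (i-1) j || chk g (i-1) (j+1) || chk g i (j-1) ||
       chk g i (j+1) || chk g (i+1) (j-1) || chk g (i+1) j || chk g (i+1) (j+1)) := by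
  unfold hasAdjacentSymbol chk
  split_ifs <;> simp_all

lemma mem_adjacentCells (g : List String) (i j : Int) :
    (i, j) ∈ adjacentCells g ↔ ∃ a b, SymAt g a b ∧ (i - a).natAbs ≤ 1 ∧ (j - b).natAbs ≤ 1 := by
  unfold adjacentCells
  rw [PySem.Set.mem_ofList]
  simp only [List.mem_flatMap, PySem.List.mem_enumerate_iff]
  constructor
  · rintro ⟨p, ⟨r, hr, rfl⟩, q, ⟨c, hc, rfl⟩, hmem⟩
    simp only [zero_add] at hmem
    split_ifs at hmem with hsym
    · simp only [List.mem_flatMap, List.mem_map, List.mem_cons,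
        List.not_mem_nil, or_false] at hmem
      obtain ⟨di, hdi, dj, hdj, heq⟩ := hmem
      refine ⟨(r : Int), (c : Int), ⟨by positivity, by exact_mod_cast hr, by positivity, ?_, ?_⟩, ?_, ?_⟩
      · rw [Int.toNat_natCast, List.getD_eq_getElem _ _ hr]; exact_mod_cast hc
      · rw [Int.toNat_natCast, Int.toNat_natCast, List.getD_eq_getElem _ _ hr,
          List.getD_eq_getElem _ _ hc]; exact hsym
      · obtain ⟨h1, h2⟩ := Prod.mk.injEq .. ▸ heq; omega
      · obtain ⟨h1, h2⟩ := Prod.mk.injEq .. ▸ heq; omega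
    · simp at hmem
  · rintro ⟨a, b, ⟨ha0, haH, hb0, hbW, hsym⟩, hia, hjb⟩
    have hr : a.toNat < g.length := by omega
    have hgetD : g.getD a.toNat "" = g[a.toNat] := List.getD_eq_getElem _ _ hr
    rw [hgetD] at hbW hsym
    have hc : b.toNat < g[a.toNat].toList.length := by omega
    rw [List.getD_eq_getElem _ _ hc] at hsym
    refine ⟨((a.toNat : Int), g[a.toNat]), ⟨a.toNat, hr, by rw [zero_add]⟩,
      ((b.toNat : Int), g[a.toNat].toList[b.toNat]), ⟨b.toNat, hc, by rw [zero_add]⟩, ?_⟩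
    rw [if_pos hsym]
    simp only [List.mem_flatMap, List.mem_map, List.mem_cons,
      List.not_mem_nil, or_false]
    exact ⟨i - a, by omega, j - b, by omega, by rw [Prod.mk.injEq]; constructor <;> omega⟩

lemma rowlen_eq (g : List String)
    (hrect : ∀ s ∈ g, s.toList.length = (g.headD "").toList.length)
    (r : Nat) (hr : r < g.length) :
    (g.getD r "").toList.length = (g.getD 0 "").toList.length := by
  have h0 : 0 < g.length := by omega
  rw [List.getD_eq_getElem _ _ hr, List.getD_eq_getElem _ _ h0]
  rw [hrect _ (List.getElem_mem hr), hrect _ (List.getElem_mem h0)]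

lemma chk_iff_symAt (g : List String)
    (hrect : ∀ s ∈ g, s.toList.length = (g.headD "").toList.length)
    (a b : Int) : chk g a b = true ↔ SymAt g a b := by
  unfold chk SymAt indexesAreNotOutOfRange
  constructor
  · intro h
    rw [Bool.and_eq_true] at h
    obtain ⟨hrange, hsym⟩ := h
    split_ifs at hrange with hR
    obtain ⟨ha0, hb0, haH, hbW⟩ := hR
    have hr : a.toNat < g.length := by omega
    have hW : (g.getD a.toNat "").toList.length = (g.getD 0 "").toList.length :=
      rowlen_eq g hrect a.toNat hr
    have hc : b.toNat < (g.getD a.toNat "").toList.length := by omega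
    refine ⟨ha0, haH, hb0, by omega, ?_⟩
    have hcell : cellA g a b = (g.getD a.toNat "").toList.getD b.toNat ' ' := by
      unfold cellA
      rw [PySem.List.pyGetD_of_nonneg _ _ ha0, PySem.List.pyGetD_of_nonneg _ _ hb0]
    rw [isASymbol_eq, hcell] at hsym
    exact hsym
  · rintro ⟨ha0, haH, hb0, hbW, hsym⟩
    have hr : a.toNat < g.length := by omega
    have hW : (g.getD a.toNat "").toList.length = (g.getD 0 "").toList.length :=
      rowlen_eq g hrect a.toNat hr
    rw [Bool.and_eq_true]
    constructor
    · rw [if_pos ⟨ha0, hb0, haH, by omega⟩]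
    · have hcell : cellA g a b = (g.getD a.toNat "").toList.getD b.toNat ' ' := by
        unfold cellA
        rw [PySem.List.pyGetD_of_nonneg _ _ ha0, PySem.List.pyGetD_of_nonneg _ _ hb0]
      rw [isASymbol_eq, hcell]
      exact hsym

-- per digit cell: A's 8-neighbour probe equals B's set lookup (rectangular grid)
lemma cell_cond_eq (g : List String)
    (hrect : ∀ s ∈ g, s.toList.length = (g.headD "").toList.length)
    (r c : Nat) (hr : r < g.length) (hc : c < g[r].toList.length)
    (hd : PySem.Chars.isdigit g[r].toList[c] = true) :
    hasAdjacentSymbol g r c = PySem.Set.contains (adjacentCells g) ((r : Int), (c : Int)) := by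
  rw [Bool.eq_iff_iff, hasAdj_or, PySem.Set.contains_iff, mem_adjacentCells]
  simp only [Bool.or_eq_true]
  constructor
  · intro h
    rcases h with ((((((h|h)|h)|h)|h)|h)|h)|h <;>
      exact ⟨_, _, (chk_iff_symAt g hrect _ _).mp h, by omega, by omega⟩
  · rintro ⟨a, b, hS, h1, h2⟩
    have hne : ¬ (a = (r:Int) ∧ b = (c:Int)) := by
      rintro ⟨rfl, rfl⟩
      obtain ⟨_, _, _, _, hsym⟩ := hS
      rw [Int.toNat_natCast, Int.toNat_natCast, List.getD_eq_getElem _ _ hr,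
        List.getD_eq_getElem _ _ hc] at hsym
      simp [isSymbolChar, hd] at hsym
    have hchk := (chk_iff_symAt g hrect a b).mpr hS
    have ha : a = (r:Int) - 1 ∨ a = (r:Int) ∨ a = (r:Int) + 1 := by omega
    have hb : b = (c:Int) - 1 ∨ b = (c:Int) ∨ b = (c:Int) + 1 := by omega
    rcases ha with rfl|rfl|rfl <;> rcases hb with rfl|rfl|rfl <;> simp_all

lemma filterMap_if_eq_filter_map {α β : Type} (l : List α) (c : α → Bool) (f : α → β) :
    l.filterMap (fun q => if c q then some (f q) else none) = (l.filter c).map f := by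
  induction l with
  | nil => rfl
  | cons x xs ih =>
    simp only [List.filterMap_cons, List.filter_cons]
    by_cases h : c x <;> simp [h, ih]

lemma A_eq (g : List String) : findSymbolAdjacentNumbers g =
    (PySem.List.enumerate g).flatMap (fun p =>
      ((PySem.List.enumerate p.2.toList).filter (fun q =>
        PySem.Chars.isdigit q.2 && hasAdjacentSymbol g p.1 q.1)).map (fun q => String.ofList [q.2])) := by
  unfold findSymbolAdjacentNumbers
  have hinner : ∀ (p : Int × String) (acc : List String),
      (PySem.List.enumerate p.2.toList).foldl (fun acc2 q =>
        if PySem.Chars.isdigit q.2 then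
          if hasAdjacentSymbol g p.1 q.1 then acc2 ++ [String.ofList [q.2]] else acc2
        else acc2) acc =
      acc ++ ((PySem.List.enumerate p.2.toList).filter (fun q =>
        PySem.Chars.isdigit q.2 && hasAdjacentSymbol g p.1 q.1)).map (fun q => String.ofList [q.2]) := by
    intro p acc
    rw [← PySem.List.foldl_append_if]
    apply PySem.List.foldl_congr_mem
    intro acc2 q _
    cases h1 : PySem.Chars.isdigit q.2 <;> cases h2 : hasAdjacentSymbol g p.1 q.1 <;> simp_all
  calc (PySem.List.enumerate g).foldl _ [] = (PySem.List.enumerate g).foldl (fun acc p =>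
        acc ++ ((PySem.List.enumerate p.2.toList).filter (fun q =>
          PySem.Chars.isdigit q.2 && hasAdjacentSymbol g p.1 q.1)).map (fun q => String.ofList [q.2])) [] := by
        apply PySem.List.foldl_congr_mem
        intro acc p _
        exact hinner p acc
    _ = _ := by rw [PySem.List.foldl_append_eq_flatMap]; rfl

lemma B_eq (g : List String) : findSymbolAdjacentNumbers_alt g =
    (PySem.List.enumerate g).flatMap (fun p =>
      ((PySem.List.enumerate p.2.toList).filter (fun q =>
        PySem.Chars.isdigit q.2 && PySem.Set.contains (adjacentCells g) (p.1, q.1))).map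
          (fun q => String.ofList [q.2])) := by
  unfold findSymbolAdjacentNumbers_alt
  simp only [filterMap_if_eq_filter_map]

-- ===== VERDICT (by name: the statement is the Claim_ definition above) =====
theorem findSymbolAdjacentNumbers_spec : Claim_equal_findSymbolAdjacentNumbers := by
  intro g _ hpre
  unfold Spec_findSymbolAdjacentNumbers
  rw [A_eq, B_eq]
  apply List.flatMap_congr
  intro p hp
  rw [PySem.List.mem_enumerate_iff] at hp
  obtain ⟨r, hr, rfl⟩ := hp
  congr 1
  apply List.filter_congr
  intro q hq
  rw [PySem.List.mem_enumerate_iff] at hq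
  obtain ⟨c, hc, rfl⟩ := hq
  simp only [zero_add]
  cases hd : PySem.Chars.isdigit g[r].toList[c]
  · simp
  · have hrect : ∀ s ∈ g, s.toList.length = (g.headD "").toList.length := by
      rcases hpre with h | h
      · exact h
      · exact absurd hd (by simp [h g[r] (List.getElem_mem hr) _ (List.getElem_mem hc)])
    rw [cell_cond_eq g hrect r c hr hc hd]
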